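-- pv_equiv track=rewrite | github.com/denghilbert/ECCV2022-Hierarchical-Memory-Learning-for-Fine-Grained-Scene-Graph-Generation | visualization/1.visualize_PredCls_and_SGCls.py | count_on
-- ===== SOURCE A (Python) =====
-- def count_on(TP, FN, FP, TN, img_path, boxes, labels, gt_rels, pred_rels, pred_rel_score, pred_rel_label, print_img=True):
--     TP, FN, FP, TN = 0, 0, 0, 0
--     # 下面这个循环计算写成对于gt计算recall
--     # for gt_triplet in gt_rels:
--     #     if gt_triplet[1] == 'on':
--     #         for triplet in pred_rels[:100]:
--     #             if gt_triplet[0] == triplet[0] and gt_triplet[2] == triplet[2] and triplet[1] == 'on':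
--     #                 TP += 1
--     #             if gt_triplet[0] == triplet[0] and gt_triplet[2] == triplet[2] and triplet[1] != 'on':
--     #                 FN += 1
--     #     if gt_triplet[1] != 'on':
--     #         for triplet in pred_rels[:100]:
--     #             if gt_triplet[0] == triplet[0] and gt_triplet[2] == triplet[2] and triplet[1] == 'on':
--     #                 FP += 1
--     #             if gt_triplet[0] == triplet[0] and gt_triplet[2] == triplet[2] and triplet[1] != 'on':
--     #                 TN += 1
--     TP_FN = 0
--     for gt_triplet in gt_rels:
--         # if gt_triplet[1] == 'on':
--         # if gt_triplet[1] == 'has':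
--         if gt_triplet[1] == 'wearing':
--             TP_FN += 1
--             for triplet in pred_rels[:100]:
--                 # if gt_triplet == triplet:
--
--                 # if gt_triplet[0] == triplet[0] and gt_triplet[2] == triplet[2] and \
--                 #         (triplet[1] == 'on' or triplet[1] == 'sitting on' or triplet[1] == 'riding' or
--                 #          triplet[1] == 'standing on' or triplet[1] == 'walking on' or
--                 #          triplet[1] == 'over' or triplet[1] == 'laying on' or
--                 #          triplet[1] == 'parked on' or triplet[1] == 'covering' or
--                 #          triplet[1] == 'lying on' or triplet[1] == 'mounted on' or
--                 #          triplet[1] == 'growing on' or triplet[1] == 'of' or triplet[1] == 'above' or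
--                 #          triplet[1] == 'painted on' or triplet[1] == 'to' or triplet[1] == 'part of'):
--
--
--                 # if gt_triplet[0] == triplet[0] and gt_triplet[2] == triplet[2] and \
--                 #         (triplet[1] == 'has' or triplet[1] == 'with' or triplet[1] == 'wearing' or
--                 #          triplet[1] == 'belonging to' or triplet[1] == 'carrying' or
--                 #          triplet[1] == 'using' or triplet[1] == 'attached to'):
--
--                 if gt_triplet[0] == triplet[0] and gt_triplet[2] == triplet[2] and \
--                         (triplet[1] == 'wearing' or triplet[1] == 'wears'):
--                     TP += 1
--                     break
--
--     # 这里前面总和和后面不相等原因是因为有的时候预测里面没有gt的head+tail组合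
--     return TP, FN, FP, TN, TP_FN
-- ===== SOURCE B (Python) =====
-- def count_on(TP, FN, FP, TN, img_path, boxes, labels, gt_rels, pred_rels, pred_rel_score, pred_rel_label, print_img=True):
--     # Inverted index: count gt 'wearing' pairs into a dict, then let the top-100
--     # predictions drive the TP sum (each distinct matching pred pair claims all
--     # gt triplets with that pair).
--     need = {}
--     TP_FN = 0
--     for g in gt_rels:
--         if g[1] == 'wearing':
--             TP_FN += 1
--             k = (g[0], g[2])
--             need[k] = need.get(k, 0) + 1
--     TP = 0
--     seen = set()
--     for t in pred_rels[:100]: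
--         if t[1] == 'wearing' or t[1] == 'wears':
--             k = (t[0], t[2])
--             if k not in seen:
--                 seen.add(k)
--                 TP += need.get(k, 0)
--     return TP, 0, 0, 0, TP_FN
-- ===== Notes on version B (the rewrite author's own statement) =====
-- stated objective: alternative
-- what changed: Inverts the loop nesting: B builds a (head,tail)->count dict from the gt 'wearing' triplets in one pass, then the top-100 predictions drive the TP sum, with each distinct matching prediction pair claiming all gt triplets with that pair at once, instead of A's per-gt break-on-first-match scan of pred_rels[:100].
import Mathlib
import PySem

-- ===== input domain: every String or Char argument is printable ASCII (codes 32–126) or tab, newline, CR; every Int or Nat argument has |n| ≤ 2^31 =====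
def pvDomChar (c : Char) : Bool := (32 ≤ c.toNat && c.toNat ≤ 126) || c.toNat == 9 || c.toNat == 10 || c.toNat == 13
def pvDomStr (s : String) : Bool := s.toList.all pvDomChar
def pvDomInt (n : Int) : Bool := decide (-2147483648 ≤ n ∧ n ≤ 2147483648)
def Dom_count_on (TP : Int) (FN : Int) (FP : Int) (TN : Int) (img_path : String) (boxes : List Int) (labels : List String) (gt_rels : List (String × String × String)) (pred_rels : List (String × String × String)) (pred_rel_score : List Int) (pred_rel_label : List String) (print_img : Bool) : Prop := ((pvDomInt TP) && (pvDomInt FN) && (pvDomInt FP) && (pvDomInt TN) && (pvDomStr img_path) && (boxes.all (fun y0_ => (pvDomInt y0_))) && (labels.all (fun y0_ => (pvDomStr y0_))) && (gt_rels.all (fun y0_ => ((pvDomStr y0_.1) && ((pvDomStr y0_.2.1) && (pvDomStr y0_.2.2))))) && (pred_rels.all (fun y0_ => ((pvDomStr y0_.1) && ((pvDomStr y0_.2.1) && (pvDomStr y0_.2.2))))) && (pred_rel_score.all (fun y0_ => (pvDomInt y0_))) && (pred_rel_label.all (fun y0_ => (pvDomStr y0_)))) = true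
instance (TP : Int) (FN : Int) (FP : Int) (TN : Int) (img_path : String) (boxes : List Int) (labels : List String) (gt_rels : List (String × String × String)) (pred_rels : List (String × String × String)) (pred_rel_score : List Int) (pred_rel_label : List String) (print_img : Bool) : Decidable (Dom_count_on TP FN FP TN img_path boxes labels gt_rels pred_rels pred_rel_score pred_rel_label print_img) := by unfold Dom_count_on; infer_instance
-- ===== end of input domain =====

-- B inverts the loop nesting: a (head,tail)->count dict over the gt 'wearing' triplets, then one pass over the top-100 predictions summing the counts of newly seen matching pairs (alternative decomposition; same result).


-- ===== PORT A =====
def countA_inner (g : String × String × String) : List (String × String × String) → Int → Int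
  | [], TP => TP
  | t :: ts, TP =>
      if g.1 == t.1 && g.2.2 == t.2.2 && (t.2.1 == "wearing" || t.2.1 == "wears") then TP + 1
      else countA_inner g ts TP

def count_on (TP : Int) (FN : Int) (FP : Int) (TN : Int) (img_path : String) (boxes : List Int) (labels : List String) (gt_rels : List (String × String × String)) (pred_rels : List (String × String × String)) (pred_rel_score : List Int) (pred_rel_label : List String) (print_img : Bool) : Int × Int × Int × Int × Int :=
  let st := gt_rels.foldl (fun (st : Int × Int) g =>
      if g.2.1 == "wearing" then
        (countA_inner g (PySem.List.slice pred_rels none (some 100)) st.1, st.2 + 1)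
      else st) (0, 0)
  (st.1, 0, 0, 0, st.2)

-- ===== PORT B =====
-- gt pass: build the (head, tail) -> count dict of gt 'wearing' triplets, counting TP_FN along
def needFold (gt_rels : List (String × String × String)) : PySem.Dict (String × String) Int × Int :=
  gt_rels.foldl (fun (st : PySem.Dict (String × String) Int × Int) g =>
      if g.2.1 == "wearing" then
        (PySem.Dict.insert st.1 (g.1, g.2.2) (PySem.Dict.getD st.1 (g.1, g.2.2) 0 + 1), st.2 + 1)
      else st) (PySem.Dict.empty, 0)

def count_on_alt (TP : Int) (FN : Int) (FP : Int) (TN : Int) (img_path : String) (boxes : List Int) (labels : List String) (gt_rels : List (String × String × String)) (pred_rels : List (String × String × String)) (pred_rel_score : List Int) (pred_rel_label : List String) (print_img : Bool) : Int × Int × Int × Int × Int :=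
  let nd := needFold gt_rels
  let st := (PySem.List.slice pred_rels none (some 100)).foldl
      (fun (st : PySem.Set (String × String) × Int) t =>
        if t.2.1 == "wearing" || t.2.1 == "wears" then
          if PySem.Set.contains st.1 (t.1, t.2.2) then st
          else (PySem.Set.add st.1 (t.1, t.2.2), st.2 + PySem.Dict.getD nd.1 (t.1, t.2.2) 0)
        else st) (PySem.Set.empty, 0)
  (st.2, 0, 0, 0, nd.2)

-- ===== PRECONDITION & SPEC =====
def Spec_count_on (TP : Int) (FN : Int) (FP : Int) (TN : Int) (img_path : String) (boxes : List Int) (labels : List String) (gt_rels : List (String × String × String)) (pred_rels : List (String × String × String)) (pred_rel_score : List Int) (pred_rel_label : List String) (print_img : Bool) (out : Int × Int × Int × Int × Int) : Prop := out = count_on_alt TP FN FP TN img_path boxes labels gt_rels pred_rels pred_rel_score pred_rel_label print_img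
instance (TP : Int) (FN : Int) (FP : Int) (TN : Int) (img_path : String) (boxes : List Int) (labels : List String) (gt_rels : List (String × String × String)) (pred_rels : List (String × String × String)) (pred_rel_score : List Int) (pred_rel_label : List String) (print_img : Bool) (out : Int × Int × Int × Int × Int) : Decidable (Spec_count_on TP FN FP TN img_path boxes labels gt_rels pred_rels pred_rel_score pred_rel_label print_img out) := by unfold Spec_count_on; infer_instance

-- ===== CLAIM (what is proved, stated in full; the proofs are below) =====
def Claim_equal_count_on : Prop := ∀ (TP : Int) (FN : Int) (FP : Int) (TN : Int) (img_path : String) (boxes : List Int) (labels : List String) (gt_rels : List (String × String × String)) (pred_rels : List (String × String × String)) (pred_rel_score : List Int) (pred_rel_label : List String) (print_img : Bool), Dom_count_on TP FN FP TN img_path boxes labels gt_rels pred_rels pred_rel_score pred_rel_label print_img → Spec_count_on TP FN FP TN img_path boxes labels gt_rels pred_rels pred_rel_score pred_rel_label print_img (count_on TP FN FP TN img_path boxes labels gt_rels pred_rels pred_rel_score pred_rel_label print_img)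

-- ===== LEMMAS AND PROOFS =====

-- proof-only abbreviations
def wgt (g : String × String × String) : Bool := g.2.1 == "wearing"
def wpr (t : String × String × String) : Bool := t.2.1 == "wearing" || t.2.1 == "wears"
def mP (P : List (String × String × String)) (k : String × String) : Bool :=
  P.any (fun t => wpr t && k == (t.1, t.2.2))
def cnt (p : (String × String × String) → Bool) (l : List (String × String × String)) : Int :=
  (l.countP p : Int)

theorem contains_add (s : PySem.Set (String × String)) (x p : String × String) :
    PySem.Set.contains (PySem.Set.add s x) p = (PySem.Set.contains s p || p == x) := by
  rw [Bool.eq_iff_iff]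
  simp [PySem.Set.contains_iff, PySem.Set.mem_add]

theorem countP_split (l : List (String × String × String))
    (p q r : (String × String × String) → Bool)
    (h : ∀ a ∈ l, (if p a then (1 : Nat) else 0) = (if q a then 1 else 0) + (if r a then 1 else 0)) :
    l.countP p = l.countP q + l.countP r := by
  induction l with
  | nil => simp
  | cons a l ih =>
    simp only [List.countP_cons]
    have := h a (by simp)
    have hrest := ih (fun b hb => h b (by simp [hb]))
    omega

theorem cnt_congr (l : List (String × String × String))
    (p q : (String × String × String) → Bool) (h : ∀ a ∈ l, p a = q a) :
    cnt p l = cnt q l := by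
  unfold cnt
  congr 1
  exact List.countP_congr (fun a ha => by rw [h a ha])

-- A's inner break-loop equals a conditional increment by the 'any' existence test
theorem countA_inner_eq (g : String × String × String) (ts : List (String × String × String)) (tp : Int) :
    countA_inner g ts tp
    = (if ts.any (fun t => (t.2.1 == "wearing" || t.2.1 == "wears") && (g.1, g.2.2) == (t.1, t.2.2)) then tp + 1 else tp) := by
  induction ts with
  | nil => simp [countA_inner]
  | cons t ts ih =>
    simp only [countA_inner, List.any_cons]
    rw [ih]
    have hC : (g.1 == t.1 && g.2.2 == t.2.2 && (t.2.1 == "wearing" || t.2.1 == "wears"))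
        = ((t.2.1 == "wearing" || t.2.1 == "wears") && (g.1, g.2.2) == (t.1, t.2.2)) := by
      rw [Bool.eq_iff_iff]
      simp only [Bool.and_eq_true, Bool.or_eq_true, beq_iff_eq, Prod.ext_iff]
      tauto
    rw [hC]
    by_cases h : ((t.2.1 == "wearing" || t.2.1 == "wears") && (g.1, g.2.2) == (t.1, t.2.2)) = true
    · simp [h]
    · simp only [Bool.not_eq_true] at h
      simp only [h, Bool.false_or, Bool.false_eq_true, if_false]

-- characterisation of A's gt fold
theorem A_fold_eq (P gt : List (String × String × String)) (a b : Int) :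
    gt.foldl (fun (st : Int × Int) g =>
      if g.2.1 == "wearing" then (countA_inner g P st.1, st.2 + 1) else st) (a, b)
    = (a + cnt (fun g => wgt g && mP P (g.1, g.2.2)) gt, b + cnt wgt gt) := by
  induction gt generalizing a b with
  | nil => simp [cnt]
  | cons g gt ih =>
    simp only [List.foldl_cons]
    by_cases hw : (g.2.1 == "wearing") = true
    · rw [if_pos hw, countA_inner_eq, ih]
      have hm : gt.countP (fun g => wgt g && mP P (g.1, g.2.2)) = (cnt (fun g => wgt g && mP P (g.1, g.2.2)) gt).toNat := rfl
      unfold cnt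
      simp only [List.countP_cons, wgt, hw, mP, wpr, Bool.true_and]
      by_cases hany : (P.any (fun t => (t.2.1 == "wearing" || t.2.1 == "wears") && (g.1, g.2.2) == (t.1, t.2.2))) = true
      · simp only [hany, if_true, if_pos]
        push_cast
        ring_nf
      · simp only [Bool.not_eq_true] at hany
        simp only [hany, Bool.false_eq_true, if_false]
        push_cast
        ring_nf
    · rw [if_neg hw, ih]
      unfold cnt
      simp only [List.countP_cons, wgt, mP]
      simp only [Bool.not_eq_true] at hw
      simp [hw]

-- characterisation of B's need dict: getD counts the gt 'wearing' triplets with that pair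
theorem need_fold_eq (gt : List (String × String × String))
    (d : PySem.Dict (String × String) Int) (n : Int) :
    (∀ k, PySem.Dict.getD
        ((gt.foldl (fun (st : PySem.Dict (String × String) Int × Int) g =>
          if g.2.1 == "wearing" then
            (PySem.Dict.insert st.1 (g.1, g.2.2) (PySem.Dict.getD st.1 (g.1, g.2.2) 0 + 1), st.2 + 1)
          else st) (d, n)).1) k 0
      = PySem.Dict.getD d k 0 + cnt (fun g => wgt g && ((g.1, g.2.2) == k)) gt)
    ∧ (gt.foldl (fun (st : PySem.Dict (String × String) Int × Int) g =>
          if g.2.1 == "wearing" then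
            (PySem.Dict.insert st.1 (g.1, g.2.2) (PySem.Dict.getD st.1 (g.1, g.2.2) 0 + 1), st.2 + 1)
          else st) (d, n)).2 = n + cnt wgt gt := by
  induction gt generalizing d n with
  | nil => simp [cnt]
  | cons g gt ih =>
    simp only [List.foldl_cons]
    by_cases hw : (g.2.1 == "wearing") = true
    · rw [if_pos hw]
      obtain ⟨ihk, ihn⟩ := ih (PySem.Dict.insert d (g.1, g.2.2) (PySem.Dict.getD d (g.1, g.2.2) 0 + 1)) (n + 1)
      constructor
      · intro k
        rw [ihk k, PySem.Dict.getD_insert]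
        unfold cnt
        simp only [List.countP_cons, wgt, hw, Bool.true_and]
        by_cases hk : k = (g.1, g.2.2)
        · subst hk
          simp only [BEq.rfl, if_pos, if_true]
          push_cast
          ring_nf
        · have hk' : ((g.1, g.2.2) == k) = false := by
            simp [beq_iff_eq]
            exact fun h => hk h.symm
          rw [if_neg hk, hk']
          simp only [Bool.false_eq_true, if_false]
          push_cast
          ring_nf
      · rw [ihn]
        unfold cnt
        simp only [List.countP_cons, wgt, hw, if_true, if_pos]
        push_cast
        ring_nf
    · rw [if_neg hw]
      obtain ⟨ihk, ihn⟩ := ih d n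
      simp only [Bool.not_eq_true] at hw
      constructor
      · intro k
        rw [ihk k]
        unfold cnt
        simp only [List.countP_cons, wgt, hw]
        simp
      · rw [ihn]
        unfold cnt
        simp only [List.countP_cons, wgt, hw]
        simp

-- invariant of B's prediction pass: it accumulates the number of still-unclaimed gt matches
theorem mP_cons (t : String × String × String) (ts : List (String × String × String)) (k : String × String) :
    mP (t :: ts) k = ((wpr t && k == (t.1, t.2.2)) || mP ts k) := by
  simp [mP]

theorem pred_fold_eq (gt : List (String × String × String))
    (P : List (String × String × String)) (seen : PySem.Set (String × String)) (tp : Int) :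
    (P.foldl (fun (st : PySem.Set (String × String) × Int) t =>
        if t.2.1 == "wearing" || t.2.1 == "wears" then
          if PySem.Set.contains st.1 (t.1, t.2.2) then st
          else (PySem.Set.add st.1 (t.1, t.2.2), st.2 + PySem.Dict.getD (needFold gt).1 (t.1, t.2.2) 0)
        else st) (seen, tp)).2
    = tp + cnt (fun g => wgt g && !PySem.Set.contains seen (g.1, g.2.2) && mP P (g.1, g.2.2)) gt := by
  induction P generalizing seen tp with
  | nil =>
    simp only [List.foldl_nil]
    have : cnt (fun g => wgt g && !PySem.Set.contains seen (g.1, g.2.2) && mP [] (g.1, g.2.2)) gt = 0 := by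
      unfold cnt
      rw [List.countP_eq_zero.mpr]
      · simp
      · intro a _
        simp [mP]
    omega
  | cons t ts ih =>
    simp only [List.foldl_cons]
    by_cases hw : (t.2.1 == "wearing" || t.2.1 == "wears") = true
    · rw [if_pos hw]
      by_cases hc : PySem.Set.contains seen (t.1, t.2.2) = true
      · rw [if_pos hc, ih]
        congr 1
        apply cnt_congr
        intro g _
        by_cases hcs : PySem.Set.contains seen (g.1, g.2.2) = true
        · rw [hcs]
          simp
        · simp only [Bool.not_eq_true] at hcs
          have hne : ((g.1, g.2.2) == (t.1, t.2.2)) = false := by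
            by_contra h
            simp only [Bool.not_eq_false, beq_iff_eq] at h
            rw [h] at hcs
            rw [hcs] at hc
            exact absurd hc (by simp)
          rw [mP_cons, hne]
          simp
      · rw [if_neg hc, ih]
        simp only [Bool.not_eq_true] at hc
        have hneed : PySem.Dict.getD (needFold gt).1 (t.1, t.2.2) 0
            = cnt (fun g => wgt g && ((g.1, g.2.2) == (t.1, t.2.2))) gt := by
          have h0 := (need_fold_eq gt PySem.Dict.empty 0).1 (t.1, t.2.2)
          unfold needFold
          rw [h0, PySem.Dict.getD_empty]
          ring
        have hsp := countP_split gt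
          (fun g => wgt g && !PySem.Set.contains seen (g.1, g.2.2) && mP (t :: ts) (g.1, g.2.2))
          (fun g => wgt g && ((g.1, g.2.2) == (t.1, t.2.2)))
          (fun g => wgt g && !PySem.Set.contains (PySem.Set.add seen (t.1, t.2.2)) (g.1, g.2.2) && mP ts (g.1, g.2.2))
          (by
            intro g _
            simp only []
            by_cases hg : wgt g = true
            · have hwpr : wpr t = true := hw
              by_cases hp : (g.1, g.2.2) = (t.1, t.2.2)
              · simp only [hp]
                have h2 : PySem.Set.contains (PySem.Set.add seen (t.1, t.2.2)) (t.1, t.2.2) = true := by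
                  rw [contains_add]
                  simp
                have h3 : mP (t :: ts) (t.1, t.2.2) = true := by
                  rw [mP_cons, hwpr]
                  simp
                have hc' : PySem.Set.contains seen (t.1, t.2.2) = false := hc
                simp only [h2, h3, hc', hg]
                simp
              · have hne : (((g.1, g.2.2) : String × String) == (t.1, t.2.2)) = false := by
                  simp only [beq_eq_false_iff_ne, ne_eq]
                  exact hp
                simp only [mP_cons, hwpr, contains_add, hne]
                simp
            · simp only [Bool.not_eq_true] at hg
              simp [hg])
        unfold cnt at hneed ⊢
        omega
    · rw [if_neg hw, ih]
      congr 1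
      apply cnt_congr
      intro g _
      have hwpr : wpr t = false := by
        simp only [Bool.not_eq_true] at hw
        exact hw
      rw [mP_cons, hwpr]
      simp

-- ===== VERDICT (by name: the statement is the Claim_ definition above) =====
theorem count_on_spec : Claim_equal_count_on := by
  intro TP FN FP TN img_path boxes labels gt_rels pred_rels pred_rel_score pred_rel_label print_img _
  unfold Spec_count_on count_on count_on_alt
  have hA := A_fold_eq (PySem.List.slice pred_rels none (some 100)) gt_rels 0 0
  have hB := pred_fold_eq gt_rels (PySem.List.slice pred_rels none (some 100)) PySem.Set.empty 0
  have hN : (needFold gt_rels).2 = 0 + cnt wgt gt_rels := by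
    unfold needFold
    exact (need_fold_eq gt_rels PySem.Dict.empty 0).2
  have hcnt : cnt (fun g => wgt g && !PySem.Set.contains PySem.Set.empty (g.1, g.2.2)
        && mP (PySem.List.slice pred_rels none (some 100)) (g.1, g.2.2)) gt_rels
      = cnt (fun g => wgt g && mP (PySem.List.slice pred_rels none (some 100)) (g.1, g.2.2)) gt_rels := by
    apply cnt_congr
    intro g _
    have h0 : PySem.Set.contains (PySem.Set.empty : PySem.Set (String × String)) (g.1, g.2.2) = false := rfl
    rw [h0]
    simp
  simp only [hA, hB, hN, hcnt]
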